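-- pv_equiv track=rewrite | github.com/Yassine-Ben-Terras/Multi-Agent-System-for-Data-Pipeline-Silent-Failure-Detection | agents/lineage_impact/manifest_parser.py | _build_child_map
-- ===== SOURCE A (Python) =====
-- from typing import Any, Dict, List, Optional, Set
--
-- def _build_child_map(parent_map: Dict[str, List[str]]) -> Dict[str, List[str]]:
--     """Invert parent_map → child_map."""
--     child_map: Dict[str, List[str]] = {}
--     for child, parents in parent_map.items():
--         for parent in parents:
--             child_map.setdefault(parent, [])
--             if child not in child_map[parent]:
--                 child_map[parent].append(child)
--     return child_map
-- ===== SOURCE B (Python) =====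
-- def _build_child_map(parent_map):
--     """Invert parent_map -> child_map by transposition: fix the parent key order
--     first, then gather each parent's children in one scan of the map."""
--     order = list(dict.fromkeys(p for parents in parent_map.values() for p in parents))
--     return {p: list(dict.fromkeys(c for c, parents in parent_map.items() if p in parents))
--             for p in order}
-- ===== Notes on version B (the rewrite author's own statement) =====
-- stated objective: alternative
-- what changed: B transposes the computation: instead of A's scatter loop that pushes each child into per-parent lists guarded by an inline 'child not in' membership check, B first fixes the parent key order (first occurrence across all parent lists, via dict.fromkeys) and then gathers each parent's children with one filtering scan of the map.
import Mathlib
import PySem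

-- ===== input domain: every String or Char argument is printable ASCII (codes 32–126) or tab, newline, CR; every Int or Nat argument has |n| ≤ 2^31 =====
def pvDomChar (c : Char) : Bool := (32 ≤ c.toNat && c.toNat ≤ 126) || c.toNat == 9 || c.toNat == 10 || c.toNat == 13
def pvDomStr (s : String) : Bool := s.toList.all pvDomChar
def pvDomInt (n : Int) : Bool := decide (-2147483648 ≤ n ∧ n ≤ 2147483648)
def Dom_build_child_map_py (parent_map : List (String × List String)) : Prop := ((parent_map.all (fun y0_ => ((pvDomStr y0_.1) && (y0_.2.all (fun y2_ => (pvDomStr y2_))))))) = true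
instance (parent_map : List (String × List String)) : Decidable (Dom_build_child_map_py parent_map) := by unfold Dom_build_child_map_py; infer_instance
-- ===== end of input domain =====

-- B inverts the map by transposition (fix parent order, then gather each parent's children
-- in a scan of the map) instead of A's scatter loop with an inline membership check.

-- ===== PORT A =====
-- association-list dict primitives (first-match, as in Python dict)
def pvHasKey : List (String × List String) → String → Bool
  | [], _ => false
  | (a, _) :: t, k => if a = k then true else pvHasKey t k

def pvGetV : List (String × List String) → String → List String
  | [], _ => []
  | (a, b) :: t, k => if a = k then b else pvGetV t k

def pvUpdV (f : List String → List String) : List (String × List String) → String → List (String × List String)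
  | [], _ => []
  | (a, b) :: t, k => if a = k then (a, f b) :: t else (a, b) :: pvUpdV f t k

def build_child_map_py (parent_map : List (String × List String)) : List (String × List String) :=
  parent_map.foldl (fun cm cp =>
    cp.2.foldl (fun cm p =>
      let cm1 := if pvHasKey cm p then cm else cm ++ [(p, [])]   -- setdefault(parent, [])
      if cp.1 ∈ pvGetV cm1 p then cm1                            -- if child not in …
      else pvUpdV (fun v => v ++ [cp.1]) cm1 p) cm) []

-- ===== PORT B =====
-- list(dict.fromkeys(l)): keep the first occurrence of each element, in order
def pvDedup (l : List String) : List String :=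
  l.foldl (fun acc x => if x ∈ acc then acc else acc ++ [x]) []

-- the comprehension 'c for c, parents in parent_map.items() if p in parents'
def pvGather (parent_map : List (String × List String)) (p : String) : List String :=
  (parent_map.filter (fun cp => decide (p ∈ cp.2))).map (fun cp => cp.1)

def build_child_map_py_alt (parent_map : List (String × List String)) : List (String × List String) :=
  (pvDedup (parent_map.flatMap (fun cp => cp.2))).map
    (fun p => (p, pvDedup (pvGather parent_map p)))

-- ===== PRECONDITION & SPEC =====
def Spec_build_child_map_py (parent_map : List (String × List String)) (out : List (String × List String)) : Prop := out = build_child_map_py_alt parent_map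
instance (parent_map : List (String × List String)) (out : List (String × List String)) : Decidable (Spec_build_child_map_py parent_map out) := by unfold Spec_build_child_map_py; infer_instance

-- ===== CLAIM (what is proved, stated in full; the proofs are below) =====
def Claim_equal_build_child_map_py : Prop := ∀ (parent_map : List (String × List String)), Dom_build_child_map_py parent_map → Spec_build_child_map_py parent_map (build_child_map_py parent_map)

-- ===== LEMMAS AND PROOFS =====

def pvStep (a : List String) (x : String) : List String := if x ∈ a then a else a ++ [x]

def pvDedupInto (v : List String) (xs : List String) : List String := xs.foldl pvStep v

def pvKeys (cm : List (String × List String)) : List String := cm.map Prod.fst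

-- the per-entry effect of A's inner loop over parent list ps with child c
def pvT (ps : List String) (c : String) (kv : String × List String) : String × List String :=
  (kv.1, if kv.1 ∈ ps ∧ c ∉ kv.2 then kv.2 ++ [c] else kv.2)

lemma pvDedup_eq_into (l : List String) : pvDedup l = pvDedupInto [] l := rfl

lemma dedupInto_acc (b : List String) : ∀ acc,
    pvDedupInto acc b = acc ++ (pvDedup b).filter (fun x => decide (x ∉ acc)) := by
  induction b with
  | nil => intro acc; simp [pvDedupInto, pvDedup]
  | cons x t ih =>
    intro acc
    have hx : pvDedup (x :: t) = x :: (pvDedup t).filter (fun y => decide (y ≠ x)) := by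
      show pvDedupInto [] (x :: t) = _
      have : pvDedupInto [] (x :: t) = pvDedupInto (pvStep [] x) t := rfl
      rw [this, ih]
      simp [pvStep, pvDedup_eq_into]
    rw [hx]
    have : pvDedupInto acc (x :: t) = pvDedupInto (pvStep acc x) t := rfl
    rw [this, ih]
    by_cases hax : x ∈ acc
    · simp only [pvStep, if_pos hax, List.filter_cons]
      have : (decide (x ∉ acc)) = false := by simp [hax]
      rw [this]
      simp only [List.filter_filter]
      congr 1
      apply List.filter_congr
      intro y hy
      by_cases hyx : y = x
      · subst hyx; simp [hax]
      · simp [hyx]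
    · simp only [pvStep, if_neg hax, List.filter_cons]
      have : (decide (x ∉ acc)) = true := by simp [hax]
      rw [this]
      simp only [List.filter_filter, List.append_assoc, List.cons_append, List.nil_append]
      congr 2
      apply List.filter_congr
      intro y hy
      by_cases hyx : y = x
      · subst hyx; simp
      · simp [hyx, List.mem_append]

lemma pvDedup_cons (x : String) (t : List String) :
    pvDedup (x :: t) = x :: (pvDedup t).filter (fun y => decide (y ≠ x)) := by
  show pvDedupInto [] (x :: t) = _
  have : pvDedupInto [] (x :: t) = pvDedupInto (pvStep [] x) t := rfl
  rw [this]
  rw [dedupInto_acc]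
  simp [pvStep, pvDedup_eq_into]

lemma mem_pvDedup (l : List String) (x : String) : x ∈ pvDedup l ↔ x ∈ l := by
  constructor
  · intro h
    induction l with
    | nil => simp [pvDedup] at h
    | cons a t ih =>
      rw [pvDedup_cons] at h
      rcases List.mem_cons.mp h with h | h
      · simp [h]
      · rcases List.mem_filter.mp h with ⟨h1, _⟩
        exact List.mem_cons_of_mem _ (ih h1)
  · intro h
    induction l with
    | nil => simp at h
    | cons a t ih =>
      rw [pvDedup_cons]
      by_cases hxa : x = a
      · simp [hxa]
      · rcases List.mem_cons.mp h with h | h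
        · exact absurd h hxa
        · exact List.mem_cons_of_mem _ (List.mem_filter.mpr ⟨ih h, by simp [hxa]⟩)

lemma pvDedup_append (a b : List String) :
    pvDedup (a ++ b) = pvDedup a ++ (pvDedup b).filter (fun x => decide (x ∉ a)) := by
  have h1 : pvDedup (a ++ b) = pvDedupInto (pvDedupInto [] a) b := by
    simp [pvDedup_eq_into, pvDedupInto, List.foldl_append]
  rw [h1, dedupInto_acc, ← pvDedup_eq_into]
  congr 1
  apply List.filter_congr
  intro y _
  simp [mem_pvDedup]

lemma nodup_pvDedup (l : List String) : (pvDedup l).Nodup := by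
  induction l with
  | nil => simp [pvDedup]
  | cons a t ih =>
    rw [pvDedup_cons]
    refine List.Nodup.cons ?_ (List.Nodup.filter _ ih)
    intro h
    rcases List.mem_filter.mp h with ⟨_, h2⟩
    simp at h2

lemma keys_map_pvT (ps : List String) (c : String) (l : List (String × List String)) :
    pvKeys (l.map (pvT ps c)) = pvKeys l := by
  induction l with
  | nil => rfl
  | cons kv t ih => simp [pvKeys, pvT] at *

lemma map_pvT_notmem (p c : String) (l : List (String × List String))
    (h : p ∉ pvKeys l) : l.map (pvT [p] c) = l := by
  induction l with
  | nil => rfl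
  | cons kv t ih =>
    simp only [pvKeys, List.map_cons, List.mem_cons] at h
    push_neg at h
    simp only [List.map_cons]
    rw [ih h.2]
    have : kv.1 ∉ [p] := by simp [Ne.symm h.1]
    simp [pvT, this]

lemma pvHasKey_iff (cm : List (String × List String)) (p : String) :
    pvHasKey cm p = true ↔ p ∈ pvKeys cm := by
  induction cm with
  | nil => simp [pvHasKey, pvKeys]
  | cons kv t ih =>
    obtain ⟨a, b⟩ := kv
    simp only [pvHasKey, pvKeys, List.map_cons, List.mem_cons]
    by_cases hap : a = p
    · simp [hap]
    · simp [hap, Ne.symm hap, ih, pvKeys]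

-- A's single inner step when p is already a key
lemma innerstep_mem (cm : List (String × List String)) (p c : String)
    (hnd : (pvKeys cm).Nodup) (hp : p ∈ pvKeys cm) :
    (if c ∈ pvGetV cm p then cm else pvUpdV (fun v => v ++ [c]) cm p) = cm.map (pvT [p] c) := by
  induction cm with
  | nil => simp [pvKeys] at hp
  | cons kv t ih =>
    obtain ⟨a, b⟩ := kv
    have hnd' : a ∉ pvKeys t ∧ (pvKeys t).Nodup := by simpa [pvKeys] using hnd
    by_cases hap : a = p
    · subst hap
      have hmt := map_pvT_notmem a c t hnd'.1
      have hget : pvGetV ((a, b) :: t) a = b := by simp [pvGetV]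
      have hT : pvT [a] c (a, b) = (a, if c ∈ b then b else b ++ [c]) := by
        by_cases hc : c ∈ b <;> simp [pvT, hc]
      rw [List.map_cons, hT, hmt, hget]
      by_cases hc : c ∈ b
      · simp [hc]
      · simp [hc, pvUpdV]
    · have hpt : p ∈ pvKeys t := by
        have hp2 : p = a ∨ p ∈ pvKeys t := by simpa [pvKeys] using hp
        rcases hp2 with h | h
        · exact absurd h.symm hap
        · exact h
      have hrec := ih hnd'.2 hpt
      have hTid : pvT [p] c (a, b) = (a, b) := by simp [pvT, hap]
      have hget : pvGetV ((a, b) :: t) p = pvGetV t p := by simp [pvGetV, hap]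
      rw [List.map_cons, hTid, hget]
      by_cases hc : c ∈ pvGetV t p
      · rw [if_pos hc] at hrec
        rw [if_pos hc, ← hrec]
      · rw [if_neg hc] at hrec
        rw [if_neg hc]
        show pvUpdV (fun v => v ++ [c]) ((a, b) :: t) p = _
        simp only [pvUpdV, if_neg hap]
        rw [hrec]

lemma pvGetV_append_notmem (cm : List (String × List String)) (p : String) (b : List String)
    (h : p ∉ pvKeys cm) : pvGetV (cm ++ [(p, b)]) p = b := by
  induction cm with
  | nil => simp [pvGetV]
  | cons kv t ih =>
    obtain ⟨a, v⟩ := kv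
    simp only [pvKeys, List.map_cons, List.mem_cons] at h
    push_neg at h
    simp only [List.cons_append, pvGetV, if_neg (Ne.symm h.1)]
    exact ih h.2

lemma pvUpdV_append_notmem (cm : List (String × List String)) (p : String) (b : List String)
    (f : List String → List String) (h : p ∉ pvKeys cm) :
    pvUpdV f (cm ++ [(p, b)]) p = cm ++ [(p, f b)] := by
  induction cm with
  | nil => simp [pvUpdV]
  | cons kv t ih =>
    obtain ⟨a, v⟩ := kv
    simp only [pvKeys, List.map_cons, List.mem_cons] at h
    push_neg at h
    simp only [List.cons_append, pvUpdV, if_neg (Ne.symm h.1)]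
    rw [ih h.2]

lemma pvT_comp (p : String) (rest : List String) (c : String) (kv : String × List String) :
    pvT rest c (pvT [p] c kv) = pvT (p :: rest) c kv := by
  obtain ⟨k, v⟩ := kv
  by_cases hkp : k = p
  · subst hkp
    by_cases hc : c ∈ v
    · simp [pvT, hc]
    · simp [pvT, hc]
  · by_cases hkr : k ∈ rest
    · simp [pvT, hkp, hkr]
    · simp [pvT, hkp, hkr]

-- A's inner loop in closed form
lemma pvT_nil (c : String) (kv : String × List String) : pvT [] c kv = kv := by
  simp [pvT]

lemma map_pvT_nil (c : String) (l : List (String × List String)) :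
    l.map (pvT [] c) = l := by
  induction l with
  | nil => rfl
  | cons kv t ih => simp [pvT_nil, ih]

lemma pvT_ne (p : String) (rest : List String) (c : String) (kv : String × List String)
    (h : kv.1 ≠ p) : pvT (p :: rest) c kv = pvT rest c kv := by
  simp [pvT, h]

lemma inner_eq (ps : List String) (c : String) : ∀ (cm : List (String × List String)),
    (pvKeys cm).Nodup →
    ps.foldl (fun cm p =>
      let cm1 := if pvHasKey cm p then cm else cm ++ [(p, [])]
      if c ∈ pvGetV cm1 p then cm1
      else pvUpdV (fun v => v ++ [c]) cm1 p) cm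
    = cm.map (pvT ps c)
      ++ ((pvDedup ps).filter (fun p => decide (p ∉ pvKeys cm))).map (fun p => (p, [c])) := by
  induction ps with
  | nil =>
    intro cm _
    simp [pvDedup, map_pvT_nil]
  | cons p rest ih =>
    intro cm hnd
    simp only [List.foldl_cons]
    by_cases hp : p ∈ pvKeys cm
    · -- p already a key: setdefault is a no-op, the step is innerstep_mem
      have hk : pvHasKey cm p = true := (pvHasKey_iff cm p).mpr hp
      have hstep :
          (let cm1 := if pvHasKey cm p then cm else cm ++ [(p, [])]
           if c ∈ pvGetV cm1 p then cm1 else pvUpdV (fun v => v ++ [c]) cm1 p)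
          = cm.map (pvT [p] c) := by
        simp only [hk, if_true]
        exact innerstep_mem cm p c hnd hp
      rw [hstep]
      have hkeys : pvKeys (cm.map (pvT [p] c)) = pvKeys cm := keys_map_pvT [p] c cm
      rw [ih (cm.map (pvT [p] c)) (hkeys ▸ hnd)]
      rw [hkeys, List.map_map]
      have hcomp : cm.map (pvT rest c ∘ pvT [p] c) = cm.map (pvT (p :: rest) c) := by
        apply List.map_congr_left
        intro kv _
        exact pvT_comp p rest c kv
      rw [hcomp]
      congr 1
      rw [pvDedup_cons, List.filter_cons]
      have : (decide (p ∉ pvKeys cm)) = false := by simp [hp]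
      rw [this]
      simp only [List.filter_filter]
      congr 1
      apply List.filter_congr
      intro x _
      by_cases hx : x ∈ pvKeys cm
      · simp [hx]
      · have hxp : x ≠ p := fun he => hx (he ▸ hp)
        simp [hx, hxp]
    · -- p is new: setdefault appends (p, []), then c is appended
      have hk : pvHasKey cm p = false := by
        have h2 := mt (pvHasKey_iff cm p).mp hp
        simpa using h2
      have hstep :
          (let cm1 := if pvHasKey cm p then cm else cm ++ [(p, [])]
           if c ∈ pvGetV cm1 p then cm1 else pvUpdV (fun v => v ++ [c]) cm1 p)
          = cm ++ [(p, [c])] := by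
        simp only [hk, Bool.false_eq_true, if_false]
        rw [pvGetV_append_notmem cm p [] hp]
        rw [pvUpdV_append_notmem cm p [] _ hp]
        simp
      rw [hstep]
      have hkeys : pvKeys (cm ++ [(p, [c])]) = pvKeys cm ++ [p] := by simp [pvKeys]
      have hnd2 : (pvKeys (cm ++ [(p, [c])])).Nodup := by
        rw [hkeys]
        simp [List.nodup_append, hnd]
        intro a ha he
        exact hp (he ▸ ha)
      rw [ih (cm ++ [(p, [c])]) hnd2]
      rw [hkeys, List.map_append]
      have hTp : ([(p, [c])].map (pvT rest c)) = [(p, [c])] := by simp [pvT]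
      rw [hTp]
      have hmap : cm.map (pvT rest c) = cm.map (pvT (p :: rest) c) := by
        apply List.map_congr_left
        intro kv hkv
        have : kv.1 ≠ p := by
          intro he
          exact hp (he ▸ List.mem_map_of_mem hkv)
        exact (pvT_ne p rest c kv this).symm
      rw [hmap, List.append_assoc]
      congr 1
      rw [pvDedup_cons, List.filter_cons]
      have hdp : (decide (p ∉ pvKeys cm)) = true := by simp [hp]
      simp only [hdp, if_true, List.map_cons, List.singleton_append, List.filter_filter]
      congr 2
      apply List.filter_congr
      intro x _
      by_cases h1 : x ∈ pvKeys cm <;> by_cases h2 : x = p <;>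
        simp [h1, h2]

lemma pvGather_cons (c : String) (ps : List String) (t : List (String × List String)) (p : String) :
    pvGather ((c, ps) :: t) p = if p ∈ ps then c :: pvGather t p else pvGather t p := by
  simp only [pvGather, List.filter_cons]
  by_cases hp : p ∈ ps
  · simp [hp]
  · simp [hp]

-- value of A's per-entry update on an existing key, pushed through one more map entry
lemma pvG_step (t : List (String × List String)) (c : String) (ps : List String)
    (kv : String × List String) :
    (fun kv => (kv.1, pvDedupInto kv.2 (pvGather t kv.1))) (pvT ps c kv)
    = (kv.1, pvDedupInto kv.2 (pvGather ((c, ps) :: t) kv.1)) := by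
  obtain ⟨k, v⟩ := kv
  rw [pvGather_cons]
  by_cases hk : k ∈ ps
  · rw [if_pos hk]
    have h1 : pvDedupInto v (c :: pvGather t k) = pvDedupInto (pvStep v c) (pvGather t k) := rfl
    rw [h1]
    have h2 : pvT ps c (k, v) = (k, pvStep v c) := by
      by_cases hc : c ∈ v <;> simp [pvT, pvStep, hk, hc]
    rw [h2]
  · rw [if_neg hk]
    have h2 : pvT ps c (k, v) = (k, v) := by simp [pvT, hk]
    rw [h2]

lemma pvDedup_gather_cons_mem (t : List (String × List String)) (c : String) (ps : List String)
    (p : String) (hp : p ∈ ps) :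
    pvDedup (pvGather ((c, ps) :: t) p) = pvDedupInto [c] (pvGather t p) := by
  rw [pvGather_cons, if_pos hp]
  show pvDedupInto [] (c :: pvGather t p) = _
  have h1 : pvDedupInto [] (c :: pvGather t p) = pvDedupInto (pvStep [] c) (pvGather t p) := rfl
  have h2 : pvStep [] c = [c] := by simp [pvStep]
  rw [h1, h2]

lemma keys_map_pair (l : List String) (c : String) :
    pvKeys (l.map (fun p => (p, [c]))) = l := by
  simp [pvKeys, List.map_map, Function.comp_def]

-- main invariant for A's outer loop
lemma main_inv (pm : List (String × List String)) : ∀ (cm : List (String × List String)),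
    (pvKeys cm).Nodup →
    pm.foldl (fun cm cp =>
      cp.2.foldl (fun cm p =>
        let cm1 := if pvHasKey cm p then cm else cm ++ [(p, [])]
        if cp.1 ∈ pvGetV cm1 p then cm1
        else pvUpdV (fun v => v ++ [cp.1]) cm1 p) cm) cm
    = cm.map (fun kv => (kv.1, pvDedupInto kv.2 (pvGather pm kv.1)))
      ++ ((pvDedup (pm.flatMap (fun cp => cp.2))).filter (fun p => decide (p ∉ pvKeys cm))).map
          (fun p => (p, pvDedup (pvGather pm p))) := by
  induction pm with
  | nil =>
    intro cm _
    simp only [List.foldl_nil, List.flatMap_nil]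
    have h1 : cm.map (fun kv => (kv.1, pvDedupInto kv.2 (pvGather [] kv.1))) = cm := by
      have : ∀ kv : String × List String,
          (kv.1, pvDedupInto kv.2 (pvGather [] kv.1)) = kv := by
        intro kv; simp [pvGather, pvDedupInto]
      simp [this]
    rw [h1]
    simp [pvDedup]
  | cons cp t ih =>
    intro cm hnd
    obtain ⟨c, ps⟩ := cp
    simp only [List.foldl_cons]
    rw [inner_eq ps c cm hnd]
    have hkeys' : pvKeys (cm.map (pvT ps c)
          ++ ((pvDedup ps).filter (fun p => decide (p ∉ pvKeys cm))).map (fun p => (p, [c])))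
        = pvKeys cm ++ (pvDedup ps).filter (fun p => decide (p ∉ pvKeys cm)) := by
      have h2 : ∀ (l1 l2 : List (String × List String)), pvKeys (l1 ++ l2) = pvKeys l1 ++ pvKeys l2 := by
        intro l1 l2; simp [pvKeys]
      rw [h2, keys_map_pvT, keys_map_pair]
    have hnd' : (pvKeys (cm.map (pvT ps c)
          ++ ((pvDedup ps).filter (fun p => decide (p ∉ pvKeys cm))).map (fun p => (p, [c])))).Nodup := by
      rw [hkeys']
      refine List.Nodup.append hnd ((nodup_pvDedup ps).filter _) ?_
      intro a ha hb
      have h3 := (List.mem_filter.mp hb).2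
      simp at h3
      exact h3 ha
    rw [ih _ hnd']
    rw [hkeys']
    rw [List.map_append, List.map_map, List.map_map]
    have e1 : cm.map ((fun kv => (kv.1, pvDedupInto kv.2 (pvGather t kv.1))) ∘ pvT ps c)
        = cm.map (fun kv => (kv.1, pvDedupInto kv.2 (pvGather ((c, ps) :: t) kv.1))) := by
      apply List.map_congr_left
      intro kv _
      exact pvG_step t c ps kv
    have e2 : ((pvDedup ps).filter (fun p => decide (p ∉ pvKeys cm))).map
          ((fun kv => (kv.1, pvDedupInto kv.2 (pvGather t kv.1))) ∘ (fun p => (p, [c])))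
        = ((pvDedup ps).filter (fun p => decide (p ∉ pvKeys cm))).map
          (fun p => (p, pvDedup (pvGather ((c, ps) :: t) p))) := by
      apply List.map_congr_left
      intro p hp
      have hps : p ∈ ps := (mem_pvDedup ps p).mp (List.mem_filter.mp hp).1
      show (p, pvDedupInto [c] (pvGather t p)) = (p, pvDedup (pvGather ((c, ps) :: t) p))
      rw [pvDedup_gather_cons_mem t c ps p hps]
    have e3 : ((pvDedup (t.flatMap (fun cp => cp.2))).filter (fun p =>
            decide (p ∉ pvKeys cm ++ (pvDedup ps).filter (fun p => decide (p ∉ pvKeys cm))))).map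
          (fun p => (p, pvDedup (pvGather t p)))
        = ((pvDedup (t.flatMap (fun cp => cp.2))).filter (fun p =>
            decide (p ∉ ps) && decide (p ∉ pvKeys cm))).map
          (fun p => (p, pvDedup (pvGather ((c, ps) :: t) p))) := by
      have hf : (pvDedup (t.flatMap (fun cp => cp.2))).filter (fun p =>
            decide (p ∉ pvKeys cm ++ (pvDedup ps).filter (fun p => decide (p ∉ pvKeys cm))))
          = (pvDedup (t.flatMap (fun cp => cp.2))).filter (fun p =>
            decide (p ∉ ps) && decide (p ∉ pvKeys cm)) := by
        apply List.filter_congr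
        intro x _
        by_cases h1 : x ∈ pvKeys cm <;> by_cases h2 : x ∈ ps <;>
          simp [h1, h2, List.mem_append, List.mem_filter, mem_pvDedup]
      rw [hf]
      apply List.map_congr_left
      intro p hp
      have hps : p ∉ ps := by
        have := (List.mem_filter.mp hp).2
        simp at this
        exact this.1
      rw [pvGather_cons, if_neg hps]
    rw [e1, e2, e3]
    have hflat : ((c, ps) :: t).flatMap (fun cp => cp.2) = ps ++ t.flatMap (fun cp => cp.2) := by
      simp
    rw [hflat, pvDedup_append]
    have hfps : (pvDedup (ps ++ t.flatMap (fun cp => cp.2))).filter (fun p => decide (p ∉ pvKeys cm))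
        = (pvDedup ps).filter (fun p => decide (p ∉ pvKeys cm))
          ++ (pvDedup (t.flatMap (fun cp => cp.2))).filter (fun p =>
              decide (p ∉ ps) && decide (p ∉ pvKeys cm)) := by
      rw [pvDedup_append, List.filter_append, List.filter_filter]
      congr 1
      apply List.filter_congr
      intro x _
      by_cases h1 : x ∈ pvKeys cm <;> by_cases h2 : x ∈ ps <;> simp [h1, h2]
    rw [pvDedup_append] at hfps
    rw [hfps, List.map_append, List.append_assoc]

-- ===== VERDICT (by name: the statement is the Claim_ definition above) =====
theorem build_child_map_py_spec : Claim_equal_build_child_map_py := by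
  intro pm _
  show build_child_map_py pm = build_child_map_py_alt pm
  have h := main_inv pm [] (by simp [pvKeys])
  simpa [build_child_map_py, build_child_map_py_alt, pvKeys] using h
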